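-- pv_equiv track=rewrite | github.com/casseb/fatec.folders | Semestre1/EP1-2.py | regraValidandoQuantidade
-- ===== SOURCE A (Python) =====
-- def validandoQuantidade(listaPecas,quantidade):
--     if(len(listaPecas)==quantidade):
--         return True
--     else:
--         return False
--
-- def regraValidandoQuantidade(dicPosicoesTotal):
--     valido = True
--     for pecas in dicPosicoesTotal.keys():
--         if(pecas=='1' and not validandoQuantidade(dicPosicoesTotal[pecas],2)):
--             valido=False
--         elif(pecas=='2' and not validandoQuantidade(dicPosicoesTotal[pecas],2)):
--             valido=False
--         elif(pecas=='3' and not validandoQuantidade(dicPosicoesTotal[pecas],5)):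
--             valido=False
--         elif(pecas=='4' and not validandoQuantidade(dicPosicoesTotal[pecas],4)):
--             valido=False
--         elif(pecas=='T' and not validandoQuantidade(dicPosicoesTotal[pecas],20)):
--             valido=False
--     return valido
-- ===== SOURCE B (Python) =====
-- def regraValidandoQuantidade(dicPosicoesTotal):
--     # No pass over the dict at all: five direct guarded lookups, O(1) in the dict size.
--     def ok(key, count):
--         pecas = dicPosicoesTotal.get(key)
--         return pecas is None or len(pecas) == count
--     return ok('1', 2) and ok('2', 2) and ok('3', 5) and ok('4', 4) and ok('T', 20)
-- ===== Notes on version B (the rewrite author's own statement) =====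
-- stated objective: alternative
-- what changed: Removes the loop over the dict entirely: instead of scanning every key with an elif chain and an accumulator, B performs five direct hash lookups (dict.get) with a presence guard and short-circuiting and, so the dict is never iterated.
import Mathlib
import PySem

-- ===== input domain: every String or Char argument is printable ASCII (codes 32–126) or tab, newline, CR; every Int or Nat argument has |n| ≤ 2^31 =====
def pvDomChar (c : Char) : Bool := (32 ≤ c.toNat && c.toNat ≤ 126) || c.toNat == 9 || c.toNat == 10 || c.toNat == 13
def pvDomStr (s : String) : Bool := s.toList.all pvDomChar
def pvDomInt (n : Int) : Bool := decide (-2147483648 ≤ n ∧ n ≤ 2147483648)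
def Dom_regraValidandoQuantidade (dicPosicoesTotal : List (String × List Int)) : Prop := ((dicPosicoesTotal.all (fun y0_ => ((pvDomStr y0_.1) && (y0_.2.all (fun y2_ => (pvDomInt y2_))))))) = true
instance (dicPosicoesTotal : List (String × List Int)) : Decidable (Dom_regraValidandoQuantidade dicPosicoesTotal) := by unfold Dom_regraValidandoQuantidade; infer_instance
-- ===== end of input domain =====

-- B removes A's loop over the dict: five direct guarded lookups instead of scanning
-- every key with an elif chain and an accumulator (objective: alternative).


-- ===== PORT A =====
def validandoQuantidade (listaPecas : List Int) (quantidade : Int) : Bool :=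
  if (listaPecas.length : Int) = quantidade then true else false

-- literal port of A: loop over the dict's keys with the elif chain; dict accesses
-- dicPosicoesTotal[pecas] always succeed (pecas comes from .keys()), so getD is exact here
def regraValidandoQuantidade (dicPosicoesTotal : List (String × List Int)) : Bool :=
  let d := PySem.Dict.ofList dicPosicoesTotal
  d.keys.foldl (fun valido pecas =>
    if pecas == "1" && !(validandoQuantidade (d.getD pecas []) 2) then false
    else if pecas == "2" && !(validandoQuantidade (d.getD pecas []) 2) then false
    else if pecas == "3" && !(validandoQuantidade (d.getD pecas []) 5) then false
    else if pecas == "4" && !(validandoQuantidade (d.getD pecas []) 4) then false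
    else if pecas == "T" && !(validandoQuantidade (d.getD pecas []) 20) then false
    else valido) true

-- ===== PORT B =====
-- the helper 'ok' of Source B: dict.get(key) is None → true, else compare the length
def pvOk (d : PySem.Dict String (List Int)) (key : String) (count : Int) : Bool :=
  match d.get? key with
  | none => true
  | some pecas => (pecas.length : Int) == count

def regraValidandoQuantidade_alt (dicPosicoesTotal : List (String × List Int)) : Bool :=
  let d := PySem.Dict.ofList dicPosicoesTotal
  pvOk d "1" 2 && pvOk d "2" 2 && pvOk d "3" 5 && pvOk d "4" 4 && pvOk d "T" 20

-- ===== PRECONDITION & SPEC =====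
def Spec_regraValidandoQuantidade (dicPosicoesTotal : List (String × List Int)) (out : Bool) : Prop := out = regraValidandoQuantidade_alt dicPosicoesTotal
instance (dicPosicoesTotal : List (String × List Int)) (out : Bool) : Decidable (Spec_regraValidandoQuantidade dicPosicoesTotal out) := by unfold Spec_regraValidandoQuantidade; infer_instance

-- ===== CLAIM (what is proved, stated in full; the proofs are below) =====
def Claim_equal_regraValidandoQuantidade : Prop := ∀ (dicPosicoesTotal : List (String × List Int)), Dom_regraValidandoQuantidade dicPosicoesTotal → Spec_regraValidandoQuantidade dicPosicoesTotal (regraValidandoQuantidade dicPosicoesTotal)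

-- ===== LEMMAS AND PROOFS =====

-- the per-key check of A's loop body, as a predicate on a single key
def pvCheck (d : PySem.Dict String (List Int)) (pecas : String) : Bool :=
  !(pecas == "1" && !(validandoQuantidade (d.getD pecas []) 2)) &&
  !(pecas == "2" && !(validandoQuantidade (d.getD pecas []) 2)) &&
  !(pecas == "3" && !(validandoQuantidade (d.getD pecas []) 5)) &&
  !(pecas == "4" && !(validandoQuantidade (d.getD pecas []) 4)) &&
  !(pecas == "T" && !(validandoQuantidade (d.getD pecas []) 20))

theorem pv_foldA (d : PySem.Dict String (List Int)) (ks : List String) (acc : Bool) :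
    ks.foldl (fun valido pecas =>
      if pecas == "1" && !(validandoQuantidade (d.getD pecas []) 2) then false
      else if pecas == "2" && !(validandoQuantidade (d.getD pecas []) 2) then false
      else if pecas == "3" && !(validandoQuantidade (d.getD pecas []) 5) then false
      else if pecas == "4" && !(validandoQuantidade (d.getD pecas []) 4) then false
      else if pecas == "T" && !(validandoQuantidade (d.getD pecas []) 20) then false
      else valido) acc = (acc && ks.all (pvCheck d)) := by
  induction ks generalizing acc with
  | nil => simp
  | cons k ks ih =>
    simp only [List.foldl_cons, List.all_cons, ih]
    cases h1 : (k == "1" && !(validandoQuantidade (d.getD k []) 2)) <;>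
    cases h2 : (k == "2" && !(validandoQuantidade (d.getD k []) 2)) <;>
    cases h3 : (k == "3" && !(validandoQuantidade (d.getD k []) 5)) <;>
    cases h4 : (k == "4" && !(validandoQuantidade (d.getD k []) 4)) <;>
    cases h5 : (k == "T" && !(validandoQuantidade (d.getD k []) 20)) <;>
      simp [pvCheck, h1, h2, h3, h4, h5]

-- a single pvOk against the per-key check at its own key
theorem pv_ok_of_check (d : PySem.Dict String (List Int)) (key : String) (count : Int)
    (hkey : ∀ k ∈ d.keys, pvCheck d k = true)
    (hsel : ∀ l : List Int, pvCheck d key = true → d.getD key [] = l → ((l.length : Int) == count) = true ∨ pvOk d key count = true) :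
    pvOk d key count = true := by
  cases hget : d.get? key with
  | none => simp [pvOk, hget]
  | some v =>
    have hc : key ∈ d.keys := by
      have : d.contains key = true := by
        rw [PySem.Dict.contains_eq_isSome_get?, hget]; rfl
      exact (PySem.Dict.contains_iff_mem_keys d key).mp this
    have hchk := hkey key hc
    have hgd : d.getD key [] = v := by simp [PySem.Dict.getD, hget]
    rcases hsel v hchk hgd with h | h
    · simp [pvOk, hget, h]
    · exact h

theorem pv_all_check_eq (d : PySem.Dict String (List Int)) :
    d.keys.all (pvCheck d)
      = (pvOk d "1" 2 && pvOk d "2" 2 && pvOk d "3" 5 && pvOk d "4" 4 && pvOk d "T" 20) := by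
  rw [Bool.eq_iff_iff, List.all_eq_true]
  simp only [Bool.and_eq_true]
  constructor
  · intro h
    refine ⟨⟨⟨⟨?_, ?_⟩, ?_⟩, ?_⟩, ?_⟩ <;>
      refine pv_ok_of_check d _ _ h (fun l hchk hgd => Or.inl ?_) <;>
      · simp only [pvCheck, validandoQuantidade, hgd] at hchk
        simp_all
  · rintro ⟨⟨⟨⟨o1, o2⟩, o3⟩, o4⟩, o5⟩ k hk
    have hget : ∃ v, d.get? k = some v := by
      cases hg : d.get? k with
      | none => exact absurd hk ((PySem.Dict.get?_eq_none_iff_not_mem_keys d k).mp hg)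
      | some v => exact ⟨v, rfl⟩
    rcases hget with ⟨v, hg⟩
    have hgd : d.getD k [] = v := by simp [PySem.Dict.getD, hg]
    by_cases h1 : k = "1"
    · subst h1; simp only [pvOk, hg] at o1; simp_all [pvCheck, validandoQuantidade]
    · by_cases h2 : k = "2"
      · subst h2; simp only [pvOk, hg] at o2; simp_all [pvCheck, validandoQuantidade]
      · by_cases h3 : k = "3"
        · subst h3; simp only [pvOk, hg] at o3; simp_all [pvCheck, validandoQuantidade]
        · by_cases h4 : k = "4"
          · subst h4; simp only [pvOk, hg] at o4; simp_all [pvCheck, validandoQuantidade]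
          · by_cases h5 : k = "T"
            · subst h5; simp only [pvOk, hg] at o5; simp_all [pvCheck, validandoQuantidade]
            · simp [pvCheck, h1, h2, h3, h4, h5]

-- ===== VERDICT (by name: the statement is the Claim_ definition above) =====
theorem regraValidandoQuantidade_spec : Claim_equal_regraValidandoQuantidade := by
  intro l _
  simp only [Spec_regraValidandoQuantidade, regraValidandoQuantidade, regraValidandoQuantidade_alt]
  rw [pv_foldA, Bool.true_and, pv_all_check_eq]
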